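-- pv_equiv track=rewrite | github.com/kalkidan-hub/password_cracker | passCracker/cracker.py | wordlist_generator
-- ===== SOURCE A (Python) =====
-- def wordlist_generator(pattern):
--     # given a pattern generate possible words
--     # Generate possible words based on the pattern
--     # This function yields each possible word
--     char_map = {
--         'd': '0123456789',
--         'l': 'abcdefghijklmnopqrstuvwxyz',
--         'u': 'ABCDEFGHIJKLMNOPQRSTUVWXYZ',
--         's': '!@#$%^&*()-_=+[]{}|;:,.<>?/~`',
--         'a': 'abcdefghijklmnopqrstuvwxyzABCDEFGHIJKLMNOPQRSTUVWXYZ1234567890!@#$%^&*()-_=+[]{}|;:,.<>?/~`'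
--     }
--
--     def generate_combinations(pattern):
--         if not pattern:
--             yield ''
--         else:
--             first, rest = pattern[0], pattern[1:]
--             if first in char_map:
--                 for char in char_map[first]:
--                     for combination in generate_combinations(rest):
--                         yield char + combination
--             else:
--                 for combination in generate_combinations(rest):
--                     yield first + combination
--
--     return generate_combinations(pattern)
-- ===== SOURCE B (Python) =====
-- def wordlist_generator(pattern):
--     # Iterative prefix-extension instead of nested recursion: one pass over the
--     # pattern, each step extending every word built so far by each choice.
--     char_map = {
--         'd': '0123456789',
--         'l': 'abcdefghijklmnopqrstuvwxyz',
--         'u': 'ABCDEFGHIJKLMNOPQRSTUVWXYZ',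
--         's': '!@#$%^&*()-_=+[]{}|;:,.<>?/~`',
--         'a': 'abcdefghijklmnopqrstuvwxyzABCDEFGHIJKLMNOPQRSTUVWXYZ1234567890!@#$%^&*()-_=+[]{}|;:,.<>?/~`'
--     }
--     words = ['']
--     for c in pattern:
--         choices = char_map.get(c, c)
--         words = [w + ch for w in words for ch in choices]
--     return words
-- ===== Notes on version B (the rewrite author's own statement) =====
-- stated objective: simpler
-- what changed: Replaces the nested recursive generator (which re-enumerates all suffix combinations for every leading character) with a single iterative left-to-right pass that extends the list of words built so far by each choice for the current pattern character.
import Mathlib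
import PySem

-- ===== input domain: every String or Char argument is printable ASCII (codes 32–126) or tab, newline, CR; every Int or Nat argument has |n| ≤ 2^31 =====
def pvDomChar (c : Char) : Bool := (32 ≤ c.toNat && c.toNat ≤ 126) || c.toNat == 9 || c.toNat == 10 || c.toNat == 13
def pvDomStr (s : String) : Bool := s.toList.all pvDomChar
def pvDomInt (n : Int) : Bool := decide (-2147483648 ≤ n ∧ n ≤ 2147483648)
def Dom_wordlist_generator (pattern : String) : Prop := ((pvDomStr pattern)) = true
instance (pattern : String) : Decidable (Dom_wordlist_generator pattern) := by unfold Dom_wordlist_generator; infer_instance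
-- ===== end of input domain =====

-- B replaces A's nested recursion by a single left-to-right pass that extends every
-- word built so far by each choice for the current pattern character (simpler, same cost).
-- A returns a generator in Python and B a list; equivalence here is about the yielded sequence of words.

-- ===== PORT A =====
-- the char_map dict of the Python source (shared by both ports, as in both Python files)
def pvCharMap : PySem.Dict Char String := PySem.Dict.ofList
  [('d', "0123456789"),
   ('l', "abcdefghijklmnopqrstuvwxyz"),
   ('u', "ABCDEFGHIJKLMNOPQRSTUVWXYZ"),
   ('s', "!@#$%^&*()-_=+[]{}|;:,.<>?/~`"),
   ('a', "abcdefghijklmnopqrstuvwxyzABCDEFGHIJKLMNOPQRSTUVWXYZ1234567890!@#$%^&*()-_=+[]{}|;:,.<>?/~`")]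

-- A's inner generate_combinations, recursion on the pattern's characters
def pvGenCombinations : List Char → List String
  | [] => [""]
  | first :: rest =>
    match pvCharMap.get? first with
    | some s => s.toList.flatMap (fun ch => (pvGenCombinations rest).map (fun comb => String.ofList (ch :: comb.toList)))
    | none => (pvGenCombinations rest).map (fun comb => String.ofList (first :: comb.toList))

def wordlist_generator (pattern : String) : List String := pvGenCombinations pattern.toList

-- ===== PORT B =====
def wordlist_generator_alt (pattern : String) : List String :=
  pattern.toList.foldl
    (fun words c =>
      let choices := pvCharMap.getD c (String.ofList [c])
      words.flatMap (fun w => choices.toList.map (fun ch => String.ofList (w.toList ++ [ch]))))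
    [""]

-- ===== PRECONDITION & SPEC =====
def Spec_wordlist_generator (pattern : String) (out : List String) : Prop := out = wordlist_generator_alt pattern
instance (pattern : String) (out : List String) : Decidable (Spec_wordlist_generator pattern out) := by unfold Spec_wordlist_generator; infer_instance

-- ===== CLAIM (what is proved, stated in full; the proofs are below) =====
def Claim_equal_wordlist_generator : Prop := ∀ (pattern : String), Dom_wordlist_generator pattern → Spec_wordlist_generator pattern (wordlist_generator pattern)

-- ===== LEMMAS AND PROOFS =====
lemma pv_ofList_cons (c : Char) (x : String) :
    String.ofList (c :: x.toList) = String.ofList [c] ++ x := by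
  rw [show (c :: x.toList) = [c] ++ x.toList from rfl, String.ofList_append,
    String.ofList_toList]

lemma pv_flatten_map_singleton (ws : List String) :
    (List.map (fun w => [w]) ws).flatten = ws := by
  induction ws with
  | nil => rfl
  | cons w ws ih => simp [ih]

-- B's fold from any word list equals "append every suffix A generates to every word"
lemma pv_foldl_eq_flatMap_gen : ∀ (l : List Char) (ws : List String),
    l.foldl (fun words c =>
      let choices := pvCharMap.getD c (String.ofList [c])
      words.flatMap (fun w => choices.toList.map (fun ch => String.ofList (w.toList ++ [ch])))) ws
    = ws.flatMap (fun w => (pvGenCombinations l).map (fun u => String.ofList (w.toList ++ u.toList))) := by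
  intro l
  induction l with
  | nil =>
    intro ws
    simp [pvGenCombinations, List.flatMap, String.ofList_toList, pv_flatten_map_singleton]
  | cons c rest ih =>
    intro ws
    simp only [List.foldl_cons, ih, pvGenCombinations]
    cases h : pvCharMap.get? c with
    | some s =>
      simp [PySem.Dict.getD_eq_get?_getD, h, List.map_flatMap, List.flatMap_assoc,
        List.flatMap_map, Function.comp_def,
        pv_ofList_cons, String.append_assoc]
    | none =>
      simp [PySem.Dict.getD_eq_get?_getD, h, List.flatMap_assoc,
        String.toList_ofList, Function.comp_def,
        pv_ofList_cons, String.append_assoc]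

-- ===== VERDICT (by name: the statement is the Claim_ definition above) =====
theorem wordlist_generator_spec : Claim_equal_wordlist_generator := by
  intro pattern _
  unfold Spec_wordlist_generator
  simp only [wordlist_generator, wordlist_generator_alt, pv_foldl_eq_flatMap_gen]
  simp [List.flatMap]
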